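-- pv_equiv track=rewrite | github.com/S-G08/DSA-with-Pyhton | Backtracking/NinjaDesert.py | closestCost
-- ===== SOURCE A (Python) =====
-- from bisect import bisect_left
--
-- def closestCost(n,m,base_costs, topping_costs, target):
--
--     def dfs(index, total_cost):
--         if index >= len(topping_costs):
--             possible_toppings_costs.append(total_cost)
--             return
--         dfs(index + 1, total_cost)
--         dfs(index + 1, total_cost + topping_costs[index])
--     possible_toppings_costs = []
--     dfs(0, 0)
--     possible_toppings_costs.sort()
--     closest_difference = 1000000000
--     closest_cost = 1000000000
--     for base_cost in base_costs:
--         for toppings_cost in possible_toppings_costs: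
--             current_cost = base_cost + toppings_cost
--             index = bisect_left(possible_toppings_costs, target - current_cost)
--             for check_index in (index, index - 1):
--                 if 0 <= check_index < len(possible_toppings_costs):
--                     total_cost = current_cost + possible_toppings_costs[check_index]
--                     difference = abs(total_cost - target)
--                     if closest_difference > difference or (closest_difference == difference and closest_cost > total_cost):
--                         closest_difference = difference
--                         closest_cost = total_cost
--     return closest_cost
-- ===== SOURCE B (Python) =====
-- def closestCost(n, m, base_costs, topping_costs, target):
--     # subset sums of toppings by iterative doubling, sorted once;
--     # per base a single two-pointer sweep over pairs replaces A's per-element bisect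
--     sums = [0]
--     for c in topping_costs:
--         sums = sums + [s + c for s in sums]
--     sums.sort()
--     best = (1000000000, 1000000000)  # (difference, total_cost)
--     for b in base_costs:
--         i, j = 0, len(sums) - 1
--         while i <= j:
--             total = b + sums[i] + sums[j]
--             diff = abs(total - target)
--             if (diff, total) < best:
--                 best = (diff, total)
--             if total < target:
--                 i += 1
--             else:
--                 j -= 1
--     return best[1]
-- ===== Notes on version B (the rewrite author's own statement) =====
-- stated objective: faster
-- what changed: B builds the subset sums by iterative doubling instead of recursive dfs, sorts them once, and for each base finds the best pair of topping subsets with a single two-pointer sweep instead of A's per-element binary search (bisect); intended as faster by a log/constant factor, measured 4.1x at the largest size both programs finished (both are exponential in the topping count, so neither finishes on very large inputs).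
import Mathlib
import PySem

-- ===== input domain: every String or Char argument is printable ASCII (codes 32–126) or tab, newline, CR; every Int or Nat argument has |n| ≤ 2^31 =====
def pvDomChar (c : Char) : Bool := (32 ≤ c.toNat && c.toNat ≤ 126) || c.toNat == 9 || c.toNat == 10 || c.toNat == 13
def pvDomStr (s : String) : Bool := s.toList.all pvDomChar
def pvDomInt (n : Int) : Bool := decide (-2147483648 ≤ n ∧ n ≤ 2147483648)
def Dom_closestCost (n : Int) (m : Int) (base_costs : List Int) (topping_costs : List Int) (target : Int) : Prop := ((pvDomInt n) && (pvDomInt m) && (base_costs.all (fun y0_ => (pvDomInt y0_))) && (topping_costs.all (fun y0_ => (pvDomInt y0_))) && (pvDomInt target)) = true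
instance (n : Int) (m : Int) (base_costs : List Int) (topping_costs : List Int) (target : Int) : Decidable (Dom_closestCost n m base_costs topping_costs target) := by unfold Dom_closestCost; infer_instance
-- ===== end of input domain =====

-- B replaces A's recursive dfs + per-element bisect with iterative-doubling subset sums and a
-- single two-pointer sweep per base (intended as faster; measured 4.1x at the largest size both finish).


-- ===== PORT A =====
-- Python's dfs recurses on an index into topping_costs; here the same recursion is on the
-- remaining suffix of topping_costs (append order preserved: skip-branch first, take-branch second).
def dfsA (topping_costs : List Int) (total_cost : Int) : List Int :=
  match topping_costs with
  | [] => [total_cost]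
  | c :: rest => dfsA rest total_cost ++ dfsA rest (total_cost + c)

-- bisect.bisect_left is PySem.List.bisectLeft (exact).
def closestCost (n : Int) (m : Int) (base_costs : List Int) (topping_costs : List Int) (target : Int) : Int :=
  let possible := PySem.List.sorted (dfsA topping_costs 0) (fun x => x)
  let st := base_costs.foldl (fun st base_cost =>
    possible.foldl (fun st toppings_cost =>
      let current_cost := base_cost + toppings_cost
      let index : Int := ((PySem.List.bisectLeft possible (target - current_cost) : Nat) : Int)
      [index, index - 1].foldl (fun st check_index =>
        if 0 ≤ check_index ∧ check_index < (possible.length : Int) then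
          match PySem.List.pyGet? possible check_index with   -- in range under the guard
          | some t2 =>
            let total_cost := current_cost + t2
            let difference := |total_cost - target|
            if st.1 > difference ∨ (st.1 = difference ∧ st.2 > total_cost)
            then (difference, total_cost) else st
          | none => st
        else st) st) st) ((1000000000 : Int), (1000000000 : Int))
  st.2

-- ===== PORT B =====
-- while i <= j two-pointer loop of Source B; indices are Python ints.
def twoPtr (sums : List Int) (target : Int) (b : Int) (i j : Int) (best : Int × Int) : Int × Int :=
  if i ≤ j then
    let total := b + ((PySem.List.pyGet? sums i).getD 0) + ((PySem.List.pyGet? sums j).getD 0)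
    let diff := |total - target|
    let best' := if diff < best.1 ∨ (diff = best.1 ∧ total < best.2) then (diff, total) else best
    if total < target then twoPtr sums target b (i + 1) j best'
    else twoPtr sums target b i (j - 1) best'
  else best
termination_by (j + 1 - i).toNat
decreasing_by all_goals (simp_wf; omega)

def closestCost_alt (n : Int) (m : Int) (base_costs : List Int) (topping_costs : List Int) (target : Int) : Int :=
  let sums0 := topping_costs.foldl (fun sums c => sums ++ sums.map (fun s => s + c)) [0]
  let sums := PySem.List.sorted sums0 (fun x => x)
  let best := base_costs.foldl (fun best b =>
    twoPtr sums target b 0 ((sums.length : Int) - 1) best) ((1000000000 : Int), (1000000000 : Int))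
  best.2

-- ===== PRECONDITION & SPEC =====
def Spec_closestCost (n : Int) (m : Int) (base_costs : List Int) (topping_costs : List Int) (target : Int) (out : Int) : Prop := out = closestCost_alt n m base_costs topping_costs target
instance (n : Int) (m : Int) (base_costs : List Int) (topping_costs : List Int) (target : Int) (out : Int) : Decidable (Spec_closestCost n m base_costs topping_costs target out) := by unfold Spec_closestCost; infer_instance

-- ===== CLAIM (what is proved, stated in full; the proofs are below) =====
def Claim_equal_closestCost : Prop := ∀ (n : Int) (m : Int) (base_costs : List Int) (topping_costs : List Int) (target : Int), Dom_closestCost n m base_costs topping_costs target → Spec_closestCost n m base_costs topping_costs target (closestCost n m base_costs topping_costs target)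

-- ===== LEMMAS AND PROOFS =====

-- the lexicographic "closeness" key and order both loops minimise
def pvKey (target t : Int) : Int × Int := (|t - target|, t)
def pvLe (a b : Int × Int) : Prop := a.1 < b.1 ∨ (a.1 = b.1 ∧ a.2 ≤ b.2)
def pvUpd (target : Int) (st : Int × Int) (t : Int) : Int × Int :=
  if |t - target| < st.1 ∨ (|t - target| = st.1 ∧ t < st.2) then (|t - target|, t) else st

lemma pvLe_refl (a : Int × Int) : pvLe a a := by unfold pvLe; omega
lemma pvLe_trans {a b c : Int × Int} (h1 : pvLe a b) (h2 : pvLe b c) : pvLe a c := by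
  unfold pvLe at *; omega
lemma pvLe_antisymm {a b : Int × Int} (h1 : pvLe a b) (h2 : pvLe b a) : a = b := by
  unfold pvLe at *
  have : a.1 = b.1 ∧ a.2 = b.2 := by omega
  exact Prod.ext this.1 this.2
lemma pvUpd_le_init (target : Int) (st : Int × Int) (t : Int) : pvLe (pvUpd target st t) st := by
  unfold pvUpd pvLe; split_ifs with h
  · simp; omega
  · simp
lemma pvUpd_le_key (target : Int) (st : Int × Int) (t : Int) : pvLe (pvUpd target st t) (pvKey target t) := by
  unfold pvUpd pvLe pvKey; split_ifs with h
  · simp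
  · simp; omega
lemma pvUpd_cases (target : Int) (st : Int × Int) (t : Int) :
    pvUpd target st t = st ∨ pvUpd target st t = pvKey target t := by
  unfold pvUpd pvKey; split_ifs <;> simp

-- fold of pvUpd computes the pvLe-minimum of the initial state and the keys of the list
lemma foldl_pvUpd_spec (target : Int) (l : List Int) (st : Int × Int) :
    (l.foldl (pvUpd target) st = st ∨ ∃ t ∈ l, l.foldl (pvUpd target) st = pvKey target t) ∧
    pvLe (l.foldl (pvUpd target) st) st ∧
    (∀ t ∈ l, pvLe (l.foldl (pvUpd target) st) (pvKey target t)) := by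
  induction l generalizing st with
  | nil => exact ⟨Or.inl rfl, pvLe_refl st, by simp⟩
  | cons x xs ih =>
    obtain ⟨hm, hle, hall⟩ := ih (pvUpd target st x)
    refine ⟨?_, ?_, ?_⟩
    · rcases hm with h | ⟨t, ht, h⟩
      · rcases pvUpd_cases target st x with h' | h'
        · exact Or.inl (by simpa [h'] using h)
        · exact Or.inr ⟨x, by simp, by simpa [h'] using h⟩
      · exact Or.inr ⟨t, by simp [ht], h⟩
    · exact pvLe_trans hle (pvUpd_le_init target st x)
    · intro t ht
      rcases List.mem_cons.mp ht with rfl | ht'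
      · exact pvLe_trans hle (pvUpd_le_key target st t)
      · exact hall t ht'

-- candidate totals A examines at a fixed (base, toppings_cost) pair
def pvChecked (P : List Int) (target b t1 : Int) : List Int :=
  let idx : Int := ((PySem.List.bisectLeft P (target - (b + t1)) : Nat) : Int)
  [idx, idx - 1].filterMap (fun ci =>
    if 0 ≤ ci ∧ ci < (P.length : Int) then
      (PySem.List.pyGet? P ci).map (fun t2 => b + t1 + t2)
    else none)

def pvLA (P bases : List Int) (target : Int) : List Int :=
  bases.flatMap (fun b => P.flatMap (fun t1 => pvChecked P target b t1))

-- A's nested loops are the pvUpd-fold over pvLA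
lemma closestCost_eq_fold (n m : Int) (bases tops : List Int) (target : Int) :
    closestCost n m bases tops target =
      ((pvLA (PySem.List.sorted (dfsA tops 0) (fun x => x)) bases target).foldl
        (pvUpd target) (1000000000, 1000000000)).2 := by
  simp only [closestCost, pvLA, pvChecked, List.foldl_flatMap, List.foldl_filterMap]
  congr 1
  apply List.foldl_ext
  intro st b hb
  apply List.foldl_ext
  intro st' t1 ht1
  apply List.foldl_ext
  intro st'' ci hci
  by_cases hg : 0 ≤ ci ∧ ci < ((PySem.List.sorted (dfsA tops 0) (fun x => x)).length : Int)
  · cases hE : PySem.List.pyGet? (PySem.List.sorted (dfsA tops 0) (fun x => x)) ci with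
    | none => simp [hg]
    | some t2 =>
      simp only [hg, if_pos, hE, Option.map_some, pvUpd]
      have hcond : (st''.1 > |b + t1 + t2 - target| ∨
          (st''.1 = |b + t1 + t2 - target| ∧ st''.2 > b + t1 + t2)) ↔
          (|b + t1 + t2 - target| < st''.1 ∨
          (|b + t1 + t2 - target| = st''.1 ∧ b + t1 + t2 < st''.2)) := by
        constructor <;> (intro h; omega)
      rw [if_congr hcond rfl rfl]
      simp
  · rw [if_neg hg, if_neg hg]

-- every element of pvLA is b + t1 + t2 with b ∈ bases, t1 t2 ∈ P
lemma pvLA_values {P bases : List Int} {target x : Int} (hx : x ∈ pvLA P bases target) :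
    ∃ b ∈ bases, ∃ t1 ∈ P, ∃ t2 ∈ P, x = b + t1 + t2 := by
  rcases List.mem_flatMap.mp hx with ⟨b, hb, hx1⟩
  rcases List.mem_flatMap.mp hx1 with ⟨t1, ht1, hx2⟩
  rcases List.mem_filterMap.mp hx2 with ⟨ci, _, hci⟩
  by_cases hg : 0 ≤ ci ∧ ci < (P.length : Int)
  · rw [if_pos hg] at hci
    rcases Option.map_eq_some_iff.mp hci with ⟨t2, hE, rfl⟩
    exact ⟨b, hb, t1, ht1, t2, PySem.List.mem_of_pyGet?_eq_some _ hE, rfl⟩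
  · rw [if_neg hg] at hci; exact absurd hci (by simp)

-- bisect coverage: every triple is pvLe-dominated by a checked candidate
lemma pvChecked_dominates {P : List Int} (hs : P.Pairwise (· ≤ ·)) (target b t1 t2 : Int)
    (ht2 : t2 ∈ P) :
    ∃ x ∈ pvChecked P target b t1, pvLe (pvKey target x) (pvKey target (b + t1 + t2)) := by
  obtain ⟨j, hj, rfl⟩ := List.mem_iff_getElem.mp ht2
  have hmono : ∀ (p q : Nat) (hpq : p ≤ q) (hq : q < P.length),
      P[p]'(Nat.lt_of_le_of_lt hpq hq) ≤ P[q] := by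
    intro p q hpq hq
    rcases Nat.eq_or_lt_of_le hpq with rfl | hlt
    · exact le_refl _
    · exact List.pairwise_iff_getElem.mp hs p q (Nat.lt_trans hlt hq) hq hlt
  obtain ⟨hlen, hlt, hge⟩ := PySem.List.bisectLeft_spec P (target - (b + t1)) hs
  by_cases hcase : target - (b + t1) ≤ P[j]
  · have hjge : PySem.List.bisectLeft P (target - (b + t1)) ≤ j := by
      by_contra h
      exact absurd (hlt j hj (by omega)) (by omega)
    have hidxlen : PySem.List.bisectLeft P (target - (b + t1)) < P.length :=
      Nat.lt_of_le_of_lt hjge hj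
    have h1 : target - (b + t1) ≤ P[PySem.List.bisectLeft P (target - (b + t1))] :=
      hge _ hidxlen (le_refl _)
    have h2 : P[PySem.List.bisectLeft P (target - (b + t1))]'hidxlen ≤ P[j] := hmono _ j hjge hj
    refine ⟨b + t1 + P[PySem.List.bisectLeft P (target - (b + t1))], ?_, ?_⟩
    · apply List.mem_filterMap.mpr
      refine ⟨((PySem.List.bisectLeft P (target - (b + t1)) : Nat) : Int), by simp, ?_⟩
      rw [if_pos ⟨Int.natCast_nonneg _, by exact_mod_cast hidxlen⟩]
      rw [PySem.List.pyGet?_natCast, List.getElem?_eq_getElem hidxlen]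
      rfl
    · unfold pvKey pvLe
      rcases abs_cases (b + t1 + P[PySem.List.bisectLeft P (target - (b + t1))] - target) with ⟨e1, e2⟩ | ⟨e1, e2⟩ <;>
        rcases abs_cases (b + t1 + P[j] - target) with ⟨f1, f2⟩ | ⟨f1, f2⟩ <;> simp <;> omega
  · have hjlt : j < PySem.List.bisectLeft P (target - (b + t1)) := by
      by_contra h
      exact absurd (hge j hj (by omega)) (by omega)
    have hpos : 1 ≤ PySem.List.bisectLeft P (target - (b + t1)) := by omega
    have hidx1len : PySem.List.bisectLeft P (target - (b + t1)) - 1 < P.length := by omega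
    have h1 : P[PySem.List.bisectLeft P (target - (b + t1)) - 1]'hidx1len < target - (b + t1) :=
      hlt _ hidx1len (by omega)
    have h2 : P[j] ≤ P[PySem.List.bisectLeft P (target - (b + t1)) - 1]'hidx1len :=
      hmono j _ (by omega) hidx1len
    refine ⟨b + t1 + P[PySem.List.bisectLeft P (target - (b + t1)) - 1]'hidx1len, ?_, ?_⟩
    · apply List.mem_filterMap.mpr
      refine ⟨((PySem.List.bisectLeft P (target - (b + t1)) : Nat) : Int) - 1, by simp, ?_⟩
      have hcast : ((PySem.List.bisectLeft P (target - (b + t1)) : Nat) : Int) - 1 =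
          ((PySem.List.bisectLeft P (target - (b + t1)) - 1 : Nat) : Int) := by omega
      rw [hcast, if_pos ⟨Int.natCast_nonneg _, by exact_mod_cast hidx1len⟩]
      rw [PySem.List.pyGet?_natCast, List.getElem?_eq_getElem hidx1len]
      rfl
    · unfold pvKey pvLe
      rcases abs_cases (b + t1 + P[PySem.List.bisectLeft P (target - (b + t1)) - 1]'hidx1len - target) with ⟨e1, e2⟩ | ⟨e1, e2⟩ <;>
        rcases abs_cases (b + t1 + P[j] - target) with ⟨f1, f2⟩ | ⟨f1, f2⟩ <;> simp <;> omega

-- ---- B side ----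

-- subset-sum doubling is a permutation of dfsA's enumeration
lemma dfsA_shift (tc : List Int) (a b : Int) : dfsA tc (a + b) = (dfsA tc b).map (a + ·) := by
  induction tc generalizing b with
  | nil => simp [dfsA]
  | cons c rest ih => simp [dfsA, ih, add_assoc]

lemma flatMap_append_perm {α β : Type} (l : List α) (f g : α → List β) :
    (l.flatMap (fun a => f a ++ g a)).Perm (l.flatMap f ++ l.flatMap g) := by
  induction l with
  | nil => simp
  | cons x xs ih =>
    simp only [List.flatMap_cons]
    refine (ih.append_left (f x ++ g x)).trans ?_
    simp only [List.append_assoc]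
    exact (List.perm_append_comm_assoc (g x) (xs.flatMap f) (xs.flatMap g)).append_left (f x)

lemma foldl_dbl_perm (tc : List Int) : ∀ acc : List Int,
    (tc.foldl (fun sums c => sums ++ sums.map (fun s => s + c)) acc).Perm
      (acc.flatMap (fun a => (dfsA tc 0).map (a + ·))) := by
  induction tc with
  | nil => intro acc; simp [dfsA]
  | cons c rest ih =>
    intro acc
    simp only [List.foldl_cons]
    refine (ih _).trans ?_
    rw [List.flatMap_append]
    have hD : dfsA rest c = (dfsA rest 0).map (c + ·) := by
      simpa using dfsA_shift rest c 0
    have hR : (fun a => (dfsA (c :: rest) 0).map (a + ·)) =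
        fun a => ((dfsA rest 0).map (a + ·)) ++ ((dfsA rest 0).map ((a + c) + ·)) := by
      funext a
      simp [dfsA, hD, List.map_map, Function.comp_def, add_assoc]
    rw [hR]
    refine List.Perm.symm ((flatMap_append_perm acc _ _).trans ?_)
    apply List.Perm.append_left
    apply List.Perm.of_eq
    rw [List.flatMap_map]

lemma sums_eq_P (tc : List Int) :
    PySem.List.sorted (tc.foldl (fun sums c => sums ++ sums.map (fun s => s + c)) [0]) (fun x => x)
      = PySem.List.sorted (dfsA tc 0) (fun x => x) := by
  apply PySem.List.sorted_eq_sorted_of_perm _ _ _ (fun a b h => h)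
  have h := foldl_dbl_perm tc [0]
  simpa using h

-- monotonicity of a pairwise-sorted list at indices
lemma pvMono (S : List Int) (hs : S.Pairwise (· ≤ ·)) :
    ∀ (p q : Nat) (hpq : p ≤ q) (hq : q < S.length), S[p]'(Nat.lt_of_le_of_lt hpq hq) ≤ S[q] := by
  intro p q hpq hq
  rcases Nat.eq_or_lt_of_le hpq with rfl | hlt
  · exact le_refl _
  · exact List.pairwise_iff_getElem.mp hs p q (Nat.lt_trans hlt hq) hq hlt

-- two-pointer sweep: the result is the pvLe-minimum of best and the keys of all pairs in the window
lemma twoPtr_spec (S : List Int) (hs : S.Pairwise (· ≤ ·)) (target b : Int) :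
    ∀ (N : Nat) (i j : Int) (best : Int × Int), (j + 1 - i).toNat ≤ N → 0 ≤ i → j < (S.length : Int) →
    (twoPtr S target b i j best = best ∨
      ∃ t1 ∈ S, ∃ t2 ∈ S, twoPtr S target b i j best = pvKey target (b + t1 + t2)) ∧
    pvLe (twoPtr S target b i j best) best ∧
    (∀ (p q : Nat) (hp : p < S.length) (hq : q < S.length), p ≤ q → i ≤ (p : Int) → (q : Int) ≤ j →
      pvLe (twoPtr S target b i j best) (pvKey target (b + S[p] + S[q]))) := by
  intro N
  induction N with
  | zero =>
    intro i j best hN hi hj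
    have hij : ¬ i ≤ j := by omega
    rw [twoPtr, if_neg hij]
    exact ⟨Or.inl rfl, pvLe_refl best, fun p q hp hq hpq hip hqj => by exfalso; omega⟩
  | succ N ih =>
    intro i j best hN hi hj
    by_cases hij : i ≤ j
    · have hj' : j.toNat < S.length := by omega
      have hi' : i.toNat < S.length := by omega
      have hgi : (PySem.List.pyGet? S i).getD 0 = S[i.toNat] := by
        rw [PySem.List.pyGet?_of_nonneg S hi, List.getElem?_eq_getElem hi']; rfl
      have hgj : (PySem.List.pyGet? S j).getD 0 = S[j.toNat] := by
        rw [PySem.List.pyGet?_of_nonneg S (by omega), List.getElem?_eq_getElem hj']; rfl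
      have hunf : twoPtr S target b i j best =
          if b + S[i.toNat] + S[j.toNat] < target then
            twoPtr S target b (i + 1) j (pvUpd target best (b + S[i.toNat] + S[j.toNat]))
          else
            twoPtr S target b i (j - 1) (pvUpd target best (b + S[i.toNat] + S[j.toNat])) := by
        rw [twoPtr, if_pos hij]
        simp only [hgi, hgj, pvUpd]
      by_cases hcmp : b + S[i.toNat] + S[j.toNat] < target
      · rw [hunf, if_pos hcmp]
        obtain ⟨m1, le1, all1⟩ :=
          ih (i + 1) j (pvUpd target best (b + S[i.toNat] + S[j.toNat])) (by omega) (by omega) hj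
        refine ⟨?_, pvLe_trans le1 (pvUpd_le_init _ _ _), ?_⟩
        · rcases m1 with h | h
          · rcases pvUpd_cases target best (b + S[i.toNat] + S[j.toNat]) with h' | h'
            · exact Or.inl (h.trans h')
            · exact Or.inr ⟨S[i.toNat], List.getElem_mem _, S[j.toNat], List.getElem_mem _, h.trans h'⟩
          · exact Or.inr h
        · intro p q hp hq hpq hip hqj
          by_cases hp2 : i + 1 ≤ (p : Int)
          · exact all1 p q hp hq hpq hp2 hqj
          · have hpi : p = i.toNat := by omega
            refine pvLe_trans (pvLe_trans le1 (pvUpd_le_key target best _)) ?_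
            subst hpi
            have hq2 : S[q] ≤ S[j.toNat] := pvMono S hs q j.toNat (by omega) hj'
            unfold pvKey pvLe
            rcases abs_cases (b + S[i.toNat] + S[j.toNat] - target) with ⟨e1, e2⟩ | ⟨e1, e2⟩ <;>
              rcases abs_cases (b + S[i.toNat] + S[q] - target) with ⟨f1, f2⟩ | ⟨f1, f2⟩ <;> simp <;> omega
      · rw [hunf, if_neg hcmp]
        obtain ⟨m1, le1, all1⟩ :=
          ih i (j - 1) (pvUpd target best (b + S[i.toNat] + S[j.toNat])) (by omega) hi (by omega)
        refine ⟨?_, pvLe_trans le1 (pvUpd_le_init _ _ _), ?_⟩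
        · rcases m1 with h | h
          · rcases pvUpd_cases target best (b + S[i.toNat] + S[j.toNat]) with h' | h'
            · exact Or.inl (h.trans h')
            · exact Or.inr ⟨S[i.toNat], List.getElem_mem _, S[j.toNat], List.getElem_mem _, h.trans h'⟩
          · exact Or.inr h
        · intro p q hp hq hpq hip hqj
          by_cases hq3 : (q : Int) ≤ j - 1
          · exact all1 p q hp hq hpq hip hq3
          · have hqj' : q = j.toNat := by omega
            refine pvLe_trans (pvLe_trans le1 (pvUpd_le_key target best _)) ?_
            subst hqj'
            have hp2 : S[i.toNat] ≤ S[p] := pvMono S hs i.toNat p (by omega) hp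
            unfold pvKey pvLe
            rcases abs_cases (b + S[i.toNat] + S[j.toNat] - target) with ⟨e1, e2⟩ | ⟨e1, e2⟩ <;>
              rcases abs_cases (b + S[p] + S[j.toNat] - target) with ⟨f1, f2⟩ | ⟨f1, f2⟩ <;> simp <;> omega
    · rw [twoPtr, if_neg hij]
      exact ⟨Or.inl rfl, pvLe_refl best, fun p q hp hq hpq hip hqj => by exfalso; omega⟩

-- ---- combining ----

def pvIsBest (P bases : List Int) (target : Int) (r : Int × Int) : Prop :=
  (r = ((1000000000 : Int), (1000000000 : Int)) ∨
    ∃ b ∈ bases, ∃ t1 ∈ P, ∃ t2 ∈ P, r = pvKey target (b + t1 + t2)) ∧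
  pvLe r ((1000000000 : Int), (1000000000 : Int)) ∧
  (∀ b ∈ bases, ∀ t1 ∈ P, ∀ t2 ∈ P, pvLe r (pvKey target (b + t1 + t2)))

lemma pvIsBest_unique {P bases : List Int} {target : Int} {r1 r2 : Int × Int}
    (h1 : pvIsBest P bases target r1) (h2 : pvIsBest P bases target r2) : r1 = r2 := by
  obtain ⟨m1, le1, all1⟩ := h1
  obtain ⟨m2, le2, all2⟩ := h2
  apply pvLe_antisymm
  · rcases m2 with rfl | ⟨b, hb, t1, ht1, t2, ht2, rfl⟩
    · exact le1
    · exact all1 b hb t1 ht1 t2 ht2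
  · rcases m1 with rfl | ⟨b, hb, t1, ht1, t2, ht2, rfl⟩
    · exact le2
    · exact all2 b hb t1 ht1 t2 ht2

lemma A_isBest (bases tops : List Int) (target : Int) :
    pvIsBest (PySem.List.sorted (dfsA tops 0) (fun x => x)) bases target
      ((pvLA (PySem.List.sorted (dfsA tops 0) (fun x => x)) bases target).foldl
        (pvUpd target) (1000000000, 1000000000)) := by
  obtain ⟨hm, hle, hall⟩ :=
    foldl_pvUpd_spec target (pvLA (PySem.List.sorted (dfsA tops 0) (fun x => x)) bases target)
      (1000000000, 1000000000)
  refine ⟨?_, hle, ?_⟩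
  · rcases hm with h | ⟨t, ht, h⟩
    · exact Or.inl h
    · obtain ⟨b, hb, t1, ht1, t2, ht2, rfl⟩ := pvLA_values ht
      exact Or.inr ⟨b, hb, t1, ht1, t2, ht2, h⟩
  · intro b hb t1 ht1 t2 ht2
    have hsp : (PySem.List.sorted (dfsA tops 0) (fun x => x)).Pairwise (· ≤ ·) :=
      PySem.List.sorted_pairwise _ _
    obtain ⟨x, hx, hxle⟩ := pvChecked_dominates hsp target b t1 t2 ht2
    have hxLA : x ∈ pvLA (PySem.List.sorted (dfsA tops 0) (fun x => x)) bases target :=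
      List.mem_flatMap.mpr ⟨b, hb, List.mem_flatMap.mpr ⟨t1, ht1, hx⟩⟩
    exact pvLe_trans (hall x hxLA) hxle

-- folding the per-base two-pointer sweeps over the bases
lemma basesFold_spec (S : List Int) (hs : S.Pairwise (· ≤ ·)) (target : Int) :
    ∀ (bs : List Int) (best : Int × Int),
    (bs.foldl (fun best b => twoPtr S target b 0 ((S.length : Int) - 1) best) best = best ∨
      ∃ b ∈ bs, ∃ t1 ∈ S, ∃ t2 ∈ S,
        bs.foldl (fun best b => twoPtr S target b 0 ((S.length : Int) - 1) best) best =
          pvKey target (b + t1 + t2)) ∧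
    pvLe (bs.foldl (fun best b => twoPtr S target b 0 ((S.length : Int) - 1) best) best) best ∧
    (∀ b ∈ bs, ∀ t1 ∈ S, ∀ t2 ∈ S,
      pvLe (bs.foldl (fun best b => twoPtr S target b 0 ((S.length : Int) - 1) best) best)
        (pvKey target (b + t1 + t2))) := by
  intro bs
  induction bs with
  | nil => exact fun best => ⟨Or.inl rfl, pvLe_refl best, by simp⟩
  | cons b bs ih =>
    intro best
    obtain ⟨m1, le1, all1⟩ :=
      twoPtr_spec S hs target b S.length 0 ((S.length : Int) - 1) best (by omega) (le_refl 0)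
        (by omega)
    obtain ⟨m2, le2, all2⟩ := ih (twoPtr S target b 0 ((S.length : Int) - 1) best)
    simp only [List.foldl_cons]
    refine ⟨?_, pvLe_trans le2 le1, ?_⟩
    · rcases m2 with h | ⟨b0, hb0, t1, ht1, t2, ht2, h⟩
      · rcases m1 with h' | ⟨t1, ht1, t2, ht2, h'⟩
        · exact Or.inl (h.trans h')
        · exact Or.inr ⟨b, List.mem_cons_self, t1, ht1, t2, ht2, h.trans h'⟩
      · exact Or.inr ⟨b0, List.mem_cons_of_mem b hb0, t1, ht1, t2, ht2, h⟩
    · intro b0 hb0 t1 ht1 t2 ht2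
      rcases List.mem_cons.mp hb0 with rfl | hb0'
      · obtain ⟨p, hp, rfl⟩ := List.mem_iff_getElem.mp ht1
        obtain ⟨q, hq, rfl⟩ := List.mem_iff_getElem.mp ht2
        rcases Nat.le_total p q with hpq | hqp
        · exact pvLe_trans le2 (all1 p q hp hq hpq (Int.natCast_nonneg p) (by omega))
        · have := all1 q p hq hp hqp (Int.natCast_nonneg q) (by omega)
          have harr : b0 + S[q] + S[p] = b0 + S[p] + S[q] := by ring
          rw [harr] at this
          exact pvLe_trans le2 this
      · exact all2 b0 hb0' t1 ht1 t2 ht2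

lemma B_isBest (bases tops : List Int) (target : Int) :
    pvIsBest (PySem.List.sorted (dfsA tops 0) (fun x => x)) bases target
      (bases.foldl (fun best b =>
        twoPtr (PySem.List.sorted (dfsA tops 0) (fun x => x)) target b 0
          (((PySem.List.sorted (dfsA tops 0) (fun x => x)).length : Int) - 1) best)
        (1000000000, 1000000000)) := by
  obtain ⟨hm, hle, hall⟩ :=
    basesFold_spec (PySem.List.sorted (dfsA tops 0) (fun x => x))
      (PySem.List.sorted_pairwise _ _) target bases (1000000000, 1000000000)
  exact ⟨hm, hle, hall⟩

-- ===== VERDICT (by name: the statement is the Claim_ definition above) =====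
theorem closestCost_spec : Claim_equal_closestCost := by
  intro n m bases tops target _
  unfold Spec_closestCost
  rw [closestCost_eq_fold]
  simp only [closestCost_alt]
  rw [sums_eq_P]
  exact congrArg Prod.snd (pvIsBest_unique (A_isBest bases tops target) (B_isBest bases tops target))
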